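-- pv_equiv track=rewrite | github.com/creditimpact/finance-project-2-0 | backend/api/app.py | pick_account_number
-- ===== SOURCE A (Python) =====
-- from typing import Any, Iterable, Mapping, Sequence
--
-- EMPTY_TOKENS = {"", "--", "n/a", "na"}
--
-- BUREAU_ORDER = ("experian", "transunion", "equifax")
--
-- _BUREAU_RANK_DEFAULT = len(BUREAU_ORDER)
--
-- _KNOWN_BUREAUS = set(BUREAU_ORDER)
--
-- def is_empty(value: Any) -> bool:
--     if value is None:
--         return True
--     text = str(value).strip()
--     if not text:
--         return True
--     return text.lower() in EMPTY_TOKENS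
--
-- def digits_count(value: Any) -> int:
--     if value is None:
--         return 0
--     return sum(char.isdigit() for char in str(value))
--
-- def _bureau_rank(bureau: str) -> int:
--     try:
--         return BUREAU_ORDER.index(bureau)
--     except ValueError:
--         return _BUREAU_RANK_DEFAULT
--
-- def _stringify(value: Any) -> str:
--     if value is None:
--         return ""
--     return value if isinstance(value, str) else str(value)
--
-- def pick_account_number(values: Mapping[str, Any] | None) -> tuple[str, str]:
--     if not isinstance(values, Mapping):
--         values = {}
--
--     candidates: list[tuple[str, str, int, int]] = []
--     for bureau_key, raw_value in values.items():
--         bureau = str(bureau_key)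
--         if _KNOWN_BUREAUS and bureau not in _KNOWN_BUREAUS:
--             continue
--         if is_empty(raw_value):
--             continue
--         text = _stringify(raw_value)
--         candidates.append((bureau, text, digits_count(text), len(text)))
--
--     if not candidates:
--         return ("", "")
--
--     max_digits = max(candidate[2] for candidate in candidates)
--     pool = [candidate for candidate in candidates if candidate[2] == max_digits]
--     if len(pool) == 1:
--         bureau, value, _, _ = pool[0]
--         return (_stringify(value), bureau)
--
--     best_rank = min(_bureau_rank(candidate[0]) for candidate in pool)
--     ranked = [candidate for candidate in pool if _bureau_rank(candidate[0]) == best_rank]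
--     if len(ranked) == 1:
--         bureau, value, _, _ = ranked[0]
--         return (_stringify(value), bureau)
--
--     bureau, value, _, _ = max(ranked, key=lambda candidate: candidate[3])
--     return (_stringify(value), bureau)
-- ===== SOURCE B (Python) =====
-- from typing import Any, Mapping
--
-- EMPTY_TOKENS = {"", "--", "n/a", "na"}
-- BUREAU_ORDER = ("experian", "transunion", "equifax")
-- _BUREAU_RANK_DEFAULT = len(BUREAU_ORDER)
-- _KNOWN_BUREAUS = set(BUREAU_ORDER)
--
-- def is_empty(value: Any) -> bool:
--     if value is None:
--         return True
--     text = str(value).strip()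
--     if not text:
--         return True
--     return text.lower() in EMPTY_TOKENS
--
-- def digits_count(value: Any) -> int:
--     if value is None:
--         return 0
--     return sum(char.isdigit() for char in str(value))
--
-- def _bureau_rank(bureau: str) -> int:
--     try:
--         return BUREAU_ORDER.index(bureau)
--     except ValueError:
--         return _BUREAU_RANK_DEFAULT
--
-- def _stringify(value: Any) -> str:
--     if value is None:
--         return ""
--     return value if isinstance(value, str) else str(value)
--
-- def pick_account_number(values: Mapping[str, Any] | None) -> tuple[str, str]:
--     if not isinstance(values, Mapping):
--         values = {}
--
--     best = None  # (bureau, text, digits, length)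
--     for bureau_key, raw_value in values.items():
--         bureau = str(bureau_key)
--         if bureau not in _KNOWN_BUREAUS or is_empty(raw_value):
--             continue
--         text = _stringify(raw_value)
--         cand = (bureau, text, digits_count(text), len(text))
--         if best is None or (cand[2], -_bureau_rank(cand[0]), cand[3]) > (best[2], -_bureau_rank(best[0]), best[3]):
--             best = cand
--
--     if best is None:
--         return ("", "")
--     return (_stringify(best[1]), best[0])
-- ===== Notes on version B (the rewrite author's own statement) =====
-- stated objective: simpler
-- what changed: Replaced A's three-stage cascade (max over digit counts, filter, min over bureau ranks, filter, max over lengths, with early returns on singleton pools) by a single one-pass running-best fold over the candidates using the lexicographic key (digits, -bureau_rank, length), keeping A's first-wins tie-breaking.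
import Mathlib
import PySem

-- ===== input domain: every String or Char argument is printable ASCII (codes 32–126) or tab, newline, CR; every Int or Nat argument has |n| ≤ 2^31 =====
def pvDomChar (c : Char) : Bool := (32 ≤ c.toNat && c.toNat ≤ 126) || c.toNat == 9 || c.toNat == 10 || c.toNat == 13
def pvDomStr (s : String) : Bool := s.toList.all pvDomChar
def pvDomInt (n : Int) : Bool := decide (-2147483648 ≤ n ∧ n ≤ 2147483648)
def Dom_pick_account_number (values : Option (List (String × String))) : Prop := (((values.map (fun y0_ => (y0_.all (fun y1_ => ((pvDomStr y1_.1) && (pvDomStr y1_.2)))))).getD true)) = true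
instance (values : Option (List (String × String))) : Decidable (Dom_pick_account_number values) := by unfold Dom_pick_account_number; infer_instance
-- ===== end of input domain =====

-- B replaces A's three-stage max/filter/min/filter/max cascade over the candidate list by a single
-- one-pass lexicographic-best fold (objective: simpler); same return value everywhere.

-- Shared same-module helpers of both Pythons (EMPTY_TOKENS, BUREAU_ORDER, is_empty, digits_count,
-- _bureau_rank, _stringify; values are str in the typed domain, so str(value) = value).
def pvEmptyTokens : List String := ["", "--", "n/a", "na"]

def pvBureauOrder : List String := ["experian", "transunion", "equifax"]

-- _KNOWN_BUREAUS = set(BUREAU_ORDER); nonempty, so the Python guard `_KNOWN_BUREAUS and …` is membership.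
def pvKnownBureaus : List String := PySem.Set.ofList pvBureauOrder

def pvIsEmpty (value : String) : Bool :=
  let text := PySem.Str.strip value
  if text = "" then true
  else pvEmptyTokens.contains (PySem.Str.lower text)

-- sum(char.isdigit() for char in str(value)) = count of isdigit chars (exact on ASCII)
def pvDigitsCount (value : String) : Int := ((value.toList.countP PySem.Chars.isdigit : Nat) : Int)

-- BUREAU_ORDER.index(bureau) with ValueError -> default 3
def pvBureauRank (bureau : String) : Int :=
  match PySem.List.index? pvBureauOrder bureau with
  | some i => (i : Int)
  | none => 3

def pvStringify (value : String) : String := value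

-- the candidate tuple (bureau, text, digits_count(text), len(text)) both Pythons build
def pvMkCand (p : String × String) : String × String × Int × Int :=
  (p.1, pvStringify p.2, pvDigitsCount (pvStringify p.2), PySem.Str.len (pvStringify p.2))

-- ===== PORT A =====
def pick_account_number (values : Option (List (String × String))) : String × String :=
  -- None is not a Mapping -> values = {}
  let vals := match values with | none => ([] : List (String × String)) | some d => d
  let candidates : List (String × String × Int × Int) :=
    vals.foldl (fun acc p =>
      if pvKnownBureaus.contains p.1 = false then acc
      else if pvIsEmpty p.2 then acc
      else acc ++ [pvMkCand p]) []
  if candidates = [] then ("", "")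
  else
    let maxd := (PySem.List.max? (candidates.map (fun c => c.2.2.1)) (fun x => x)).getD 0
    let pool := candidates.filter (fun c => c.2.2.1 == maxd)
    match pool with
    | [c] => (pvStringify c.2.1, c.1)
    | _ =>
      let bestRank := (PySem.List.min? (pool.map (fun c => pvBureauRank c.1)) (fun x => x)).getD 0
      let ranked := pool.filter (fun c => pvBureauRank c.1 == bestRank)
      match ranked with
      | [c] => (pvStringify c.2.1, c.1)
      | _ =>
        match PySem.List.max? ranked (fun c => c.2.2.2) with
        | some c => (pvStringify c.2.1, c.1)
        | none => ("", "")  -- unreachable: ranked is nonempty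

-- ===== PORT B =====
-- Python tuple comparison (c2, -rc, c3) > (b2, -rb, b3), spelled out lexicographically:
def pvTie (c b : String × String × Int × Int) : Bool :=
  decide (-(pvBureauRank b.1) < -(pvBureauRank c.1)) ||
    ((-(pvBureauRank b.1) == -(pvBureauRank c.1)) && decide (b.2.2.2 < c.2.2.2))

def pvKeyGt (c b : String × String × Int × Int) : Bool :=
  decide (b.2.2.1 < c.2.2.1) || ((b.2.2.1 == c.2.2.1) && pvTie c b)

def pick_account_number_alt (values : Option (List (String × String))) : String × String :=
  let vals := match values with | none => ([] : List (String × String)) | some d => d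
  let best : Option (String × String × Int × Int) :=
    vals.foldl (fun best p =>
      if !(pvKnownBureaus.contains p.1) || pvIsEmpty p.2 then best
      else
        match best with
        | none => some (pvMkCand p)
        | some b => if pvKeyGt (pvMkCand p) b then some (pvMkCand p) else some b) none
  match best with
  | none => ("", "")
  | some b => (pvStringify b.2.1, b.1)

-- ===== PRECONDITION & SPEC =====
def Spec_pick_account_number (values : Option (List (String × String))) (out : String × String) : Prop := out = pick_account_number_alt values
instance (values : Option (List (String × String))) (out : String × String) : Decidable (Spec_pick_account_number values out) := by unfold Spec_pick_account_number; infer_instance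

-- ===== CLAIM (what is proved, stated in full; the proofs are below) =====
def Claim_equal_pick_account_number : Prop := ∀ (values : Option (List (String × String))), Dom_pick_account_number values → Spec_pick_account_number values (pick_account_number values)

-- ===== LEMMAS AND PROOFS =====

-- fold with an Option accumulator started at `some b` (the shape of PySem.List.max?) (the shape of PySem.List.max?)
theorem pvFoldlOpt' {α : Type} (r : α → α → Prop) [DecidableRel r] (l : List α) (b : α) :
    l.foldl (fun acc x => match acc with
      | none => some x
      | some m => if r x m then some x else some m) (some b)
    = some (l.foldl (fun m x => if r x m then x else m) b) := by
  induction l generalizing b with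
  | nil => rfl
  | cons c l ih =>
    simp only [List.foldl_cons]
    by_cases h : r c b <;> simp [h, ih]

-- max?(a :: l, key) is the running strict-improvement fold from a
theorem pvMax?Cons {α : Type} (key : α → Int) (a : α) (l : List α) :
    PySem.List.max? (a :: l) key
      = some (l.foldl (fun m x => if key m < key x then x else m) a) := by
  simp only [PySem.List.max?, List.foldl_cons]
  exact pvFoldlOpt' (fun x m => key m < key x) l a

-- MAIN: a lexicographic best-fold over a :: l equals the tie-break fold over the
-- sublist attaining the maximum of the primary component f, started at its first element.
theorem pvFoldlLexFilter {α : Type} (f : α → Int) (g2 : α → α → Bool) (M : Int)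
    (a : α) (l : List α)
    (hle : ∀ x ∈ a :: l, f x ≤ M) (hex : ∃ x ∈ a :: l, f x = M) :
    ∃ p t, (a :: l).filter (fun x => f x == M) = p :: t ∧
      l.foldl (fun b c => if (f b < f c) || (f b == f c && g2 c b) then c else b) a
        = t.foldl (fun b c => if g2 c b then c else b) p := by
  induction l generalizing a with
  | nil =>
    have ha : f a = M := by
      obtain ⟨x, hx, hfx⟩ := hex
      simp at hx; subst hx; exact hfx
    exact ⟨a, [], by simp [ha], rfl⟩
  | cons c l ih =>
    simp only [List.foldl_cons]
    by_cases hfa : f a = M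
    · by_cases hfc : f c = M
      · have hstep : (if (f a < f c) || (f a == f c && g2 c a) then c else a)
            = (if g2 c a then c else a) := by
          simp [hfa, hfc]
        rw [hstep]
        set a' := if g2 c a then c else a with ha'
        have hfa' : f a' = M := by
          by_cases h : g2 c a <;> simp [ha', h, hfa, hfc]
        obtain ⟨p, t, hfilt, hfold⟩ := ih a'
          (by intro x hx; rcases List.mem_cons.1 hx with h | h
              · subst h; omega
              · exact hle x (by simp [h]))
          ⟨a', by simp, hfa'⟩
        rw [List.filter_cons_of_pos (by simp [hfa'])] at hfilt
        obtain ⟨rfl, rfl⟩ : p = a' ∧ t = l.filter (fun x => f x == M) := by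
          cases hfilt; exact ⟨rfl, rfl⟩
        refine ⟨a, c :: l.filter (fun x => f x == M), ?_, ?_⟩
        · simp [hfa, hfc]
        · simp only [List.foldl_cons]
          rw [← ha', hfold]
      · have hlt : f c < M := lt_of_le_of_ne (hle c (by simp)) hfc
        have hstep : (if (f a < f c) || (f a == f c && g2 c a) then c else a) = a := by
          have h1 : ¬ f a < f c := by omega
          have h2 : f a ≠ f c := by omega
          simp [h1, h2]
        rw [hstep]
        obtain ⟨p, t, hfilt, hfold⟩ := ih a
          (by intro x hx; rcases List.mem_cons.1 hx with h | h
              · subst h; omega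
              · exact hle x (by simp [h]))
          ⟨a, by simp, hfa⟩
        refine ⟨p, t, ?_, hfold⟩
        rw [List.filter_cons_of_pos (by simp [hfa])] at hfilt ⊢
        rw [List.filter_cons_of_neg (by simp [hfc])]
        exact hfilt
    · have hfalt : f a < M := lt_of_le_of_ne (hle a (by simp)) hfa
      set a' := if (f a < f c) || (f a == f c && g2 c a) then c else a with ha'
      have hmem : a' = a ∨ a' = c := by
        by_cases h : (f a < f c) || (f a == f c && g2 c a) <;> simp [ha', h]
      have hle' : ∀ x ∈ a' :: l, f x ≤ M := by
        intro x hx; rcases List.mem_cons.1 hx with h | h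
        · subst h; rcases hmem with h | h <;> rw [h]
          · exact hle a (by simp)
          · exact hle c (by simp)
        · exact hle x (by simp [h])
      have hcase : f c = M ∨ f c < M := by
        have := hle c (by simp); omega
      have hex' : ∃ x ∈ a' :: l, f x = M := by
        rcases hcase with h | h
        · refine ⟨a', by simp, ?_⟩
          have hflt : f a < f c := by omega
          have : a' = c := by simp [ha', hflt]
          rw [this, h]
        · obtain ⟨x, hx, hfx⟩ := hex
          rcases List.mem_cons.1 hx with h1 | h1
          · subst h1; omega
          · rcases List.mem_cons.1 h1 with h2 | h2
            · subst h2; omega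
            · exact ⟨x, by simp [h2], hfx⟩
      obtain ⟨p, t, hfilt, hfold⟩ := ih a' hle' hex'
      refine ⟨p, t, ?_, hfold⟩
      rw [List.filter_cons_of_neg (by simp [hfa])]
      rcases hcase with h | h
      · have hflt : f a < f c := by omega
        have hac : a' = c := by simp [ha', hflt]
        rw [← hfilt, hac]
      · have hfa' : f a' ≠ M := by rcases hmem with h1 | h1 <;> rw [h1] <;> omega
        rw [List.filter_cons_of_neg (by simp [hfa'])] at hfilt
        rw [List.filter_cons_of_neg (by simp; omega)]
        exact hfilt

-- the two stage instantiations, restated through pvKeyGt / pvTie (definitionally the same steps)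
theorem pvStage1 (M : Int) (a : String × String × Int × Int) (l : List (String × String × Int × Int))
    (hle : ∀ x ∈ a :: l, x.2.2.1 ≤ M) (hex : ∃ x ∈ a :: l, x.2.2.1 = M) :
    ∃ p t, (a :: l).filter (fun c => c.2.2.1 == M) = p :: t ∧
      l.foldl (fun b c => if pvKeyGt c b then c else b) a
        = t.foldl (fun b c => if pvTie c b then c else b) p :=
  pvFoldlLexFilter (fun c => c.2.2.1) pvTie M a l hle hex

theorem pvStage2 (M : Int) (a : String × String × Int × Int) (l : List (String × String × Int × Int))
    (hle : ∀ x ∈ a :: l, -(pvBureauRank x.1) ≤ M) (hex : ∃ x ∈ a :: l, -(pvBureauRank x.1) = M) :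
    ∃ p t, (a :: l).filter (fun c => -(pvBureauRank c.1) == M) = p :: t ∧
      l.foldl (fun b c => if pvTie c b then c else b) a
        = t.foldl (fun b c => if decide (b.2.2.2 < c.2.2.2) then c else b) p :=
  pvFoldlLexFilter (fun c => -(pvBureauRank c.1)) (fun c b => decide (b.2.2.2 < c.2.2.2)) M a l hle hex

-- shared candidate filter / builder, and the two ports re-expressed through them
def pvKeep (p : String × String) : Bool := pvKnownBureaus.contains p.1 && !pvIsEmpty p.2

def pvCandsOf (vals : List (String × String)) : List (String × String × Int × Int) :=
  (vals.filter pvKeep).map pvMkCand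

def pvValsOf (values : Option (List (String × String))) : List (String × String) :=
  match values with | none => [] | some d => d

-- A's selection cascade (the code of pick_account_number after the candidate loop)
def pvSelect (cs : List (String × String × Int × Int)) : String × String :=
  if cs = [] then ("", "")
  else
    let maxd := (PySem.List.max? (cs.map (fun c => c.2.2.1)) (fun x => x)).getD 0
    let pool := cs.filter (fun c => c.2.2.1 == maxd)
    match pool with
    | [c] => (pvStringify c.2.1, c.1)
    | _ =>
      let bestRank := (PySem.List.min? (pool.map (fun c => pvBureauRank c.1)) (fun x => x)).getD 0
      let ranked := pool.filter (fun c => pvBureauRank c.1 == bestRank)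
      match ranked with
      | [c] => (pvStringify c.2.1, c.1)
      | _ =>
        match PySem.List.max? ranked (fun c => c.2.2.2) with
        | some c => (pvStringify c.2.1, c.1)
        | none => ("", "")

-- B's running-best step and finisher
def pvOFold (best : Option (String × String × Int × Int)) (c : String × String × Int × Int) :
    Option (String × String × Int × Int) :=
  match best with
  | none => some c
  | some b => if pvKeyGt c b then some c else some b

def pvFinish (ob : Option (String × String × Int × Int)) : String × String :=
  match ob with
  | none => ("", "")
  | some b => (pvStringify b.2.1, b.1)

theorem pvCandsEq (vals : List (String × String)) :
    vals.foldl (fun acc p =>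
      if pvKnownBureaus.contains p.1 = false then acc
      else if pvIsEmpty p.2 then acc
      else acc ++ [pvMkCand p]) [] = pvCandsOf vals := by
  have hstep : (fun (acc : List (String × String × Int × Int)) p =>
      if pvKnownBureaus.contains p.1 = false then acc
      else if pvIsEmpty p.2 then acc
      else acc ++ [pvMkCand p])
      = (fun acc p => if pvKeep p then acc ++ [pvMkCand p] else acc) := by
    funext acc p
    by_cases h2 : pvIsEmpty p.2 <;> simp [pvKeep, h2]
  rw [hstep, PySem.List.foldl_append_if pvKeep pvMkCand vals []]
  rfl

theorem pvAltFoldEq (vals : List (String × String)) :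
    vals.foldl (fun best p =>
      if !(pvKnownBureaus.contains p.1) || pvIsEmpty p.2 then best
      else
        match best with
        | none => some (pvMkCand p)
        | some b => if pvKeyGt (pvMkCand p) b then some (pvMkCand p) else some b) none
    = (pvCandsOf vals).foldl pvOFold none := by
  rw [pvCandsOf, List.foldl_map, List.foldl_filter]
  congr 1
  funext best p
  simp only [pvOFold]
  by_cases h2 : pvIsEmpty p.2 <;> simp [pvKeep, h2]

-- B's Option-accumulator fold from `some b` is `some` of the plain running-best fold
theorem pvOFoldSome (l : List (String × String × Int × Int)) (b : String × String × Int × Int) :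
    l.foldl pvOFold (some b) = some (l.foldl (fun m x => if pvKeyGt x m then x else m) b) := by
  induction l generalizing b with
  | nil => rfl
  | cons c l ih =>
    simp only [List.foldl_cons, pvOFold]
    by_cases h : pvKeyGt c b <;> simp [h, ih]

-- the core selection equivalence, on any candidate list
theorem pvSelectEq (cs : List (String × String × Int × Int)) :
    pvSelect cs = pvFinish (cs.foldl pvOFold none) := by
  cases cs with
  | nil => rfl
  | cons c0 rest =>
    have hBfold : (c0 :: rest).foldl pvOFold none
        = some (rest.foldl (fun b c => if pvKeyGt c b then c else b) c0) := by
      simp only [List.foldl_cons]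
      exact pvOFoldSome rest c0
    rw [hBfold]
    obtain ⟨m, hm⟩ : ∃ m, PySem.List.max? ((c0 :: rest).map (fun c => c.2.2.1)) (fun x => x) = some m := by
      cases h : PySem.List.max? ((c0 :: rest).map (fun c => c.2.2.1)) (fun x => x) with
      | none => exact absurd ((PySem.List.max?_eq_none_iff _ _).1 h) (by simp)
      | some m => exact ⟨m, rfl⟩
    have hle1 : ∀ x ∈ c0 :: rest, x.2.2.1 ≤ m := fun x hx =>
      PySem.List.max?_isMax hm _ (List.mem_map_of_mem hx)
    have hex1 : ∃ x ∈ c0 :: rest, x.2.2.1 = m := by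
      obtain ⟨c, hc, hfc⟩ := List.mem_map.1 (PySem.List.max?_mem hm)
      exact ⟨c, hc, hfc⟩
    obtain ⟨p, t, hfilt, hfold⟩ := pvStage1 m c0 rest hle1 hex1
    rw [pvSelect, if_neg (by simp), hm]
    simp only [Option.getD_some]
    rw [hfilt, hfold]
    cases t with
    | nil => rfl
    | cons t1 t2 =>
      obtain ⟨r, hr⟩ : ∃ r, PySem.List.min? ((p :: t1 :: t2).map (fun c => pvBureauRank c.1)) (fun x => x) = some r := by
        cases h : PySem.List.min? ((p :: t1 :: t2).map (fun c => pvBureauRank c.1)) (fun x => x) with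
        | none => exact absurd ((PySem.List.min?_eq_none_iff _ _).1 h) (by simp)
        | some r => exact ⟨r, rfl⟩
      have hle2 : ∀ x ∈ p :: t1 :: t2, -(pvBureauRank x.1) ≤ -r := by
        intro x hx
        have := PySem.List.min?_isMin hr _ (List.mem_map_of_mem hx)
        omega
      have hex2 : ∃ x ∈ p :: t1 :: t2, -(pvBureauRank x.1) = -r := by
        obtain ⟨c, hc, hfc⟩ := List.mem_map.1 (PySem.List.min?_mem hr)
        exact ⟨c, hc, by omega⟩
      obtain ⟨p', t', hfilt2, hfold2⟩ := pvStage2 (-r) p (t1 :: t2) hle2 hex2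
      have hranked : (p :: t1 :: t2).filter (fun c => pvBureauRank c.1 == r) = p' :: t' := by
        rw [← hfilt2]
        apply List.filter_congr
        intro x _
        rw [Bool.eq_iff_iff]
        simp
      rw [hr]
      simp only [Option.getD_some]
      rw [hranked, hfold2]
      cases t' with
      | nil => rfl
      | cons u1 u2 =>
        rw [pvMax?Cons (fun c => c.2.2.2) p' (u1 :: u2)]
        have hstep : (fun (b c : String × String × Int × Int) => if decide (b.2.2.2 < c.2.2.2) then c else b)
            = (fun m x => if m.2.2.2 < x.2.2.2 then x else m) := by
          funext b c
          simp
        rw [hstep]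
        rfl

theorem pvMainEq (values : Option (List (String × String))) :
    pick_account_number values = pick_account_number_alt values := by
  have hA : pick_account_number values
      = pvSelect ((pvValsOf values).foldl (fun acc p =>
          if pvKnownBureaus.contains p.1 = false then acc
          else if pvIsEmpty p.2 then acc
          else acc ++ [pvMkCand p]) []) := rfl
  have hB : pick_account_number_alt values
      = pvFinish ((pvValsOf values).foldl (fun best p =>
          if !(pvKnownBureaus.contains p.1) || pvIsEmpty p.2 then best
          else
            match best with
            | none => some (pvMkCand p)
            | some b => if pvKeyGt (pvMkCand p) b then some (pvMkCand p) else some b) none) := rfl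
  rw [hA, hB, pvCandsEq, pvAltFoldEq, pvSelectEq]

-- ===== VERDICT (by name: the statement is the Claim_ definition above) =====
theorem pick_account_number_spec : Claim_equal_pick_account_number := by
  intro values _
  unfold Spec_pick_account_number
  exact pvMainEq values
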